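-- pv_equiv track=rewrite | github.com/harvard-edge/cs249r_book | book/tools/audit/checks/concept_term_capitalization.py | _bold_spans
-- ===== SOURCE A (Python) =====
-- def _bold_spans(line: str) -> list[tuple[int, int]]:
--     """Return (open_pos, close_pos_exclusive) for every bold span on the
--     line. Both `**...**` and `***...***` count; single `*...*` italics
--     are NOT bold and are not returned.
--
--     Consecutive `**`/`***` markers are paired in order (open, close,
--     open, close, ...). An unpaired trailing marker is ignored. Nested
--     bold markers in the same line are rare and are handled by
--     pair-order (not by stack depth).
--     """
--     markers: list[tuple[int, int]] = []  # (position, marker_length)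
--     i = 0
--     n = len(line)
--     while i < n:
--         if i + 3 <= n and line[i:i+3] == "***":
--             markers.append((i, 3))
--             i += 3
--         elif i + 2 <= n and line[i:i+2] == "**":
--             markers.append((i, 2))
--             i += 2
--         else:
--             i += 1
--
--     spans: list[tuple[int, int]] = []
--     for j in range(0, len(markers) - 1, 2):
--         open_pos, _ = markers[j]
--         close_pos, close_len = markers[j + 1]
--         spans.append((open_pos, close_pos + close_len))
--     return spans
-- ===== SOURCE B (Python) =====
-- def _bold_spans(line: str) -> list[tuple[int, int]]:
--     """Single pass: emit a span as soon as a closing marker is found,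
--     keeping only one pending open position instead of a markers list."""
--     spans: list[tuple[int, int]] = []
--     pending = None
--     i = 0
--     n = len(line)
--     while i < n:
--         if line.startswith("***", i):
--             m = 3
--         elif line.startswith("**", i):
--             m = 2
--         else:
--             i += 1
--             continue
--         if pending is None:
--             pending = i
--         else:
--             spans.append((pending, i + m))
--             pending = None
--         i += m
--     return spans
-- ===== Notes on version B (the rewrite author's own statement) =====
-- stated objective: simpler
-- what changed: Replaces A's two-phase design (collect all (pos,len) markers, then pair them by even/odd index in a second loop) with a single pass that keeps only an optional pending open position and emits each span at its closing marker.
import Mathlib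
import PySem

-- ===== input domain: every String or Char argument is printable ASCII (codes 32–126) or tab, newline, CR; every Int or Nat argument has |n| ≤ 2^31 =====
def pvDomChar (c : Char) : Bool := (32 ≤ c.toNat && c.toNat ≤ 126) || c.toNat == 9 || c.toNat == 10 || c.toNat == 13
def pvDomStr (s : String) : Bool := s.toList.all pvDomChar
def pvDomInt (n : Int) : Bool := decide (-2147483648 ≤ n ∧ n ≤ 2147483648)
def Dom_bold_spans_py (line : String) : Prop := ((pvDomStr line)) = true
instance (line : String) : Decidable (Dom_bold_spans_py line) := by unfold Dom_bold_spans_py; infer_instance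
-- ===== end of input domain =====

-- B replaces A's collect-markers-then-pair two-phase loop by a single pass with one
-- pending open position; same return value, same O(n) cost (objective: simpler).
-- ===== PORT A =====
-- phase 1 of A: scan left to right; line[i:i+3] == "***" / line[i:i+2] == "**" become
-- take-compare on the remaining characters, else advance 1 (exact for the while loop)
def pvScanA : List Char → Int → List (Int × Int)
  | [], _ => []
  | c :: rest, i =>
    if (c :: rest).take 3 = ['*', '*', '*'] then
      (i, 3) :: pvScanA (rest.drop 2) (i + 3)
    else if (c :: rest).take 2 = ['*', '*'] then
      (i, 2) :: pvScanA (rest.drop 1) (i + 2)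
    else
      pvScanA rest (i + 1)
termination_by cs _ => cs.length
decreasing_by all_goals (simp [List.length_drop]; try omega)

-- phase 2 of A: consume markers two at a time (range(0, len(markers)-1, 2) over j, j+1)
def pvPairA : List (Int × Int) → List (Int × Int)
  | (o, _) :: (c, l) :: rest => (o, c + l) :: pvPairA rest
  | _ => []

def bold_spans_py (line : String) : List (Int × Int) :=
  pvPairA (pvScanA line.toList 0)

-- ===== PORT B =====
-- B: one pass; startswith("***", i) / startswith("**", i) as take-compare; emit
-- (pending, i + m) at each closing marker, else remember the open position
def pvScanB : List Char → Int → Option Int → List (Int × Int)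
  | [], _, _ => []
  | c :: rest, i, pd =>
    if (c :: rest).take 3 = ['*', '*', '*'] then
      match pd with
      | none => pvScanB (rest.drop 2) (i + 3) (some i)
      | some p => (p, i + 3) :: pvScanB (rest.drop 2) (i + 3) none
    else if (c :: rest).take 2 = ['*', '*'] then
      match pd with
      | none => pvScanB (rest.drop 1) (i + 2) (some i)
      | some p => (p, i + 2) :: pvScanB (rest.drop 1) (i + 2) none
    else
      pvScanB rest (i + 1) pd
termination_by cs _ _ => cs.length
decreasing_by all_goals (simp [List.length_drop]; try omega)

def bold_spans_py_alt (line : String) : List (Int × Int) :=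
  pvScanB line.toList 0 none

-- ===== PRECONDITION & SPEC =====
def Spec_bold_spans_py (line : String) (out : List (Int × Int)) : Prop := out = bold_spans_py_alt line
instance (line : String) (out : List (Int × Int)) : Decidable (Spec_bold_spans_py line out) := by unfold Spec_bold_spans_py; infer_instance

-- ===== CLAIM (what is proved, stated in full; the proofs are below) =====
def Claim_equal_bold_spans_py : Prop := ∀ (line : String), Dom_bold_spans_py line → Spec_bold_spans_py line (bold_spans_py line)

-- ===== LEMMAS AND PROOFS =====
-- The one-pass scan computes exactly the pairing of A's marker list: with no pending
-- open it equals pvPairA of the markers; with pending p it equals pvPairA of the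
-- markers with (p, l) prepended (any l: an open marker's stored length is unused).
theorem pvScan_key (cs : List Char) (i : Int) :
    pvScanB cs i none = pvPairA (pvScanA cs i) ∧
    ∀ (p l : Int), pvScanB cs i (some p) = pvPairA ((p, l) :: pvScanA cs i) := by
  induction cs, i using pvScanA.induct with
  | case1 i =>
      exact ⟨by simp [pvScanA, pvScanB, pvPairA],
             fun p l => by simp [pvScanA, pvScanB, pvPairA]⟩
  | case2 c rest i h3 ih =>
      refine ⟨?_, fun p l => ?_⟩
      · simp [pvScanA, pvScanB, h3]
        exact ih.2 i 3
      · simp [pvScanA, pvScanB, h3, pvPairA, ih.1]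
  | case3 c rest i h3 h2 ih =>
      have hc : ¬(c = '*' ∧ rest.take 2 = ['*', '*']) := by
        rintro ⟨hc, ht⟩
        exact h3 (by simp [List.take_succ_cons, hc, ht])
      have ih' := ih
      simp only [List.drop_one] at ih'
      refine ⟨?_, fun p l => ?_⟩
      · simp [pvScanA, pvScanB, h2, hc]
        exact ih'.2 i 2
      · simp [pvScanA, pvScanB, h2, hc, pvPairA, ih'.1]
  | case4 c rest i h3 h2 ih =>
      have hc3 : ¬(c = '*' ∧ rest.take 2 = ['*', '*']) := by
        rintro ⟨hc, ht⟩
        exact h3 (by simp [List.take_succ_cons, hc, ht])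
      have hc2 : ¬(c = '*' ∧ rest.take 1 = ['*']) := by
        rintro ⟨hc, ht⟩
        exact h2 (by simp [List.take_succ_cons, hc, ht])
      refine ⟨?_, fun p l => ?_⟩
      · simp [pvScanA, pvScanB, hc3, hc2, ih.1]
      · simp [pvScanA, pvScanB, hc3, hc2]
        exact ih.2 p l

-- ===== VERDICT (by name: the statement is the Claim_ definition above) =====
theorem bold_spans_py_spec : Claim_equal_bold_spans_py := by
  intro line _
  unfold Spec_bold_spans_py bold_spans_py bold_spans_py_alt
  exact (pvScan_key line.toList 0).1.symm
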